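-- pv_equiv track=rewrite | github.com/VargaAlbert/shop_sync_api | src/merge/engine.py | build_master_keys
-- ===== SOURCE A (Python) =====
-- from typing import Any, Dict, List, Mapping, Optional, Sequence, Tuple
--
-- Product = Dict[str, Any]
--
-- def build_master_keys(master_products: Sequence[Product]) -> List[str]:
--     """
--     Megnézi a master mintán, hogy mely kulcsok alapján szoktunk tudni párosítani.
--     Nálad jellemzően: match_key / model / gtin/ean.
--     """
--     # preferált sorrend
--     candidates = ["match_key", "model", "modelNumber", "gtin", "ean", "sku"]
--     present: List[str] = []
--     for k in candidates:
--         for p in master_products[:200]:  # elég mintát nézni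
--             v = p.get(k)
--             if v is None:
--                 continue
--             if isinstance(v, str) and v.strip():
--                 present.append(k)
--                 break
--             if not isinstance(v, str):
--                 present.append(k)
--                 break
--     # duplikáció kiszűrés, sorrend megtartás
--     seen = set()
--     out = []
--     for k in present:
--         if k not in seen:
--             seen.add(k)
--             out.append(k)
--     return out
-- ===== SOURCE B (Python) =====
-- def build_master_keys(master_products):
--     candidates = ["match_key", "model", "modelNumber", "gtin", "ean", "sku"]
--     found = set()
--     for p in master_products[:200]:
--         for k in candidates:
--             v = p.get(k)
--             if v is None:
--                 continue
--             if isinstance(v, str) and not v.strip():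
--                 continue
--             found.add(k)
--     return [k for k in candidates if k in found]
-- ===== Notes on version B (the rewrite author's own statement) =====
-- stated objective: simpler
-- what changed: Inverted the loop nesting: instead of one scan-with-break over the products per candidate key followed by a dedup pass, B makes a single product-major pass filling a set of qualifying keys and then filters the candidate list by membership, with no dedup pass needed.
import Mathlib
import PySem

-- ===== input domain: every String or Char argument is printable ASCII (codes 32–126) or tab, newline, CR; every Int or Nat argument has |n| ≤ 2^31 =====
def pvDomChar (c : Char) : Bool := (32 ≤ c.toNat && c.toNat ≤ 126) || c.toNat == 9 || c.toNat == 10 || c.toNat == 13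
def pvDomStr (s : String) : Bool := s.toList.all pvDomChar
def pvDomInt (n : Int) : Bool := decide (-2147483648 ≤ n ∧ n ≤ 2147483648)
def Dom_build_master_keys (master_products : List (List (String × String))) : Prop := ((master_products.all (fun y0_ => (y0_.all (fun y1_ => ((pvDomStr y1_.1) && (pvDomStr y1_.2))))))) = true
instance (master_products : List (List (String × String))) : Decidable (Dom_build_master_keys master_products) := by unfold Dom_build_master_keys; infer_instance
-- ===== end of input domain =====

-- B inverts A's loop nesting: one product-major pass fills a set of qualifying keys, then the
-- candidate list is filtered by membership; A's per-key scan-with-break and its dedup pass disappear.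

-- ===== PORT A =====
-- inner loop 'for p in master_products[:200]: v = p.get(k); …' with its continue/break
def pvScanA (k : String) : List (List (String × String)) → Bool
  | [] => false
  | p :: ps =>
    match (PySem.Dict.mk p).get? k with
    | none => pvScanA k ps                      -- v is None: continue
    | some v =>
      if PySem.Str.strip v ≠ "" then true       -- present.append(k); break
      else pvScanA k ps                         -- empty-after-strip str: loop continues

-- 'seen = set(); out = []; for k in present: …'
def pvDedupA : List String → PySem.Set String → List String → List String
  | [], _, out => out
  | k :: rest, seen, out =>
    if PySem.Set.contains seen k then pvDedupA rest seen out
    else pvDedupA rest (PySem.Set.add seen k) (out ++ [k])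

def build_master_keys (master_products : List (List (String × String))) : List String :=
  let candidates := ["match_key", "model", "modelNumber", "gtin", "ean", "sku"]
  let sample := PySem.List.slice master_products none (some 200)
  let present := candidates.foldl (fun acc k => if pvScanA k sample then acc ++ [k] else acc) []
  pvDedupA present PySem.Set.empty []

-- ===== PORT B =====
-- 'v = p.get(k); if v is None: continue; if isinstance(v, str) and not v.strip(): continue; found.add(k)'
def pvQualB (p : List (String × String)) (k : String) : Bool :=
  match (PySem.Dict.mk p).get? k with
  | none => false
  | some v => !(PySem.Str.strip v == "")

def build_master_keys_alt (master_products : List (List (String × String))) : List String :=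
  let candidates := ["match_key", "model", "modelNumber", "gtin", "ean", "sku"]
  let found : PySem.Set String :=
    (PySem.List.slice master_products none (some 200)).foldl
      (fun s p => candidates.foldl (fun s k => if pvQualB p k then PySem.Set.add s k else s) s)
      PySem.Set.empty
  candidates.filter (fun k => PySem.Set.contains found k)

-- ===== PRECONDITION & SPEC =====
def Spec_build_master_keys (master_products : List (List (String × String))) (out : List String) : Prop := out = build_master_keys_alt master_products
instance (master_products : List (List (String × String))) (out : List String) : Decidable (Spec_build_master_keys master_products out) := by unfold Spec_build_master_keys; infer_instance

-- ===== CLAIM (what is proved, stated in full; the proofs are below) =====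
def Claim_equal_build_master_keys : Prop := ∀ (master_products : List (List (String × String))), Dom_build_master_keys master_products → Spec_build_master_keys master_products (build_master_keys master_products)

-- ===== LEMMAS AND PROOFS =====

-- A's scan-with-break answers: does some sampled product qualify for key k?
theorem pvScanA_eq_any (k : String) (ps : List (List (String × String))) :
    pvScanA k ps = ps.any (fun p => pvQualB p k) := by
  induction ps with
  | nil => simp [pvScanA]
  | cons p ps ih =>
    cases h : (PySem.Dict.mk p).get? k with
    | none => simp [pvScanA, pvQualB, h, ih]
    | some v =>
      by_cases hv : PySem.Str.strip v = ""
      · simp [pvScanA, pvQualB, h, hv, ih]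
      · simp [pvScanA, pvQualB, h, hv]

-- membership after B's inner fold over the candidate keys
theorem pvMem_inner_fold (p : List (String × String)) (ks : List String)
    (s : PySem.Set String) (x : String) :
    (x ∈ ks.foldl (fun s k => if pvQualB p k then PySem.Set.add s k else s) s) ↔
      x ∈ s ∨ (x ∈ ks ∧ pvQualB p x = true) := by
  induction ks generalizing s with
  | nil => simp
  | cons k ks ih =>
    simp only [List.foldl_cons, List.mem_cons, ih]
    by_cases hq : pvQualB p k = true
    · rw [if_pos hq]
      simp only [PySem.Set.mem_add]
      constructor
      · rintro (⟨hs | rfl⟩ | ⟨hk, hqx⟩)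
        · exact Or.inl hs
        · exact Or.inr ⟨Or.inl rfl, hq⟩
        · exact Or.inr ⟨Or.inr hk, hqx⟩
      · rintro (hs | ⟨(rfl | hk), hqx⟩)
        · exact Or.inl (Or.inl hs)
        · exact Or.inl (Or.inr rfl)
        · exact Or.inr ⟨hk, hqx⟩
    · rw [if_neg hq]
      constructor
      · rintro (hs | ⟨hk, hqx⟩)
        · exact Or.inl hs
        · exact Or.inr ⟨Or.inr hk, hqx⟩
      · rintro (hs | ⟨(rfl | hk), hqx⟩)
        · exact Or.inl hs
        · exact absurd hqx hq
        · exact Or.inr ⟨hk, hqx⟩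

-- membership after B's outer fold over the sampled products
theorem pvMem_outer_fold (ps : List (List (String × String))) (ks : List String)
    (s : PySem.Set String) (x : String) :
    (x ∈ ps.foldl (fun s p => ks.foldl (fun s k => if pvQualB p k then PySem.Set.add s k else s) s) s) ↔
      x ∈ s ∨ (x ∈ ks ∧ ps.any (fun p => pvQualB p x) = true) := by
  induction ps generalizing s with
  | nil => simp
  | cons p ps ih =>
    simp only [List.foldl_cons, ih, pvMem_inner_fold, List.any_cons, Bool.or_eq_true]
    tauto

-- A's dedup pass is the identity on a Nodup list disjoint from `seen`
theorem pvDedupA_nodup (xs : List String) (seen : PySem.Set String) (out : List String)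
    (hnd : xs.Nodup) (hdisj : ∀ x ∈ xs, x ∉ seen) :
    pvDedupA xs seen out = out ++ xs := by
  induction xs generalizing seen out with
  | nil => simp [pvDedupA]
  | cons k rest ih =>
    have hk : k ∉ seen := hdisj k (List.mem_cons_self ..)
    have hc : PySem.Set.contains seen k = false := by
      cases hcc : PySem.Set.contains seen k with
      | false => rfl
      | true => exact absurd ((PySem.Set.contains_iff seen k).mp hcc) hk
    rw [pvDedupA, hc]
    simp only [Bool.false_eq_true, if_false]
    rw [ih _ _ (List.Nodup.of_cons hnd)
        (fun x hx hmem => by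
          rcases (PySem.Set.mem_add seen k x).mp hmem with hs | rfl
          · exact hdisj x (List.mem_cons_of_mem _ hx) hs
          · exact (List.nodup_cons.mp hnd).1 hx)]
    simp

theorem build_master_keys_spec : Claim_equal_build_master_keys := by
  intro mps _
  unfold Spec_build_master_keys build_master_keys build_master_keys_alt
  simp only [PySem.List.foldl_append_if_eq_filter, List.nil_append]
  rw [pvDedupA_nodup _ _ _
      (List.Nodup.filter _ (by decide))
      (fun x _ hx => by simp [PySem.Set.empty] at hx)]
  simp only [List.nil_append]
  apply List.filter_congr
  intro k hk
  rw [pvScanA_eq_any]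
  cases hany : (PySem.List.slice mps none (some 200)).any (fun p => pvQualB p k) with
  | true =>
    have : k ∈ (PySem.List.slice mps none (some 200)).foldl
        (fun s p => (["match_key", "model", "modelNumber", "gtin", "ean", "sku"]).foldl
          (fun s k => if pvQualB p k then PySem.Set.add s k else s) s) PySem.Set.empty := by
      rw [pvMem_outer_fold]
      exact Or.inr ⟨hk, hany⟩
    exact ((PySem.Set.contains_iff _ _).mpr this).symm
  | false =>
    cases hc : PySem.Set.contains _ k with
    | false => rfl
    | true =>
      have := (PySem.Set.contains_iff _ _).mp hc
      rw [pvMem_outer_fold] at this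
      rcases this with hs | ⟨_, ha⟩
      · simp [PySem.Set.empty] at hs
      · rw [hany] at ha; cases ha
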